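-- pv_equiv track=rewrite | github.com/Spectra-Audit/spectra-blockchain-worker | scout/balance_replayer.py | _calculate_nakamoto
-- ===== SOURCE A (Python) =====
-- from typing import List, Optional, Tuple
--
-- def _calculate_nakamoto(
--
--     balances: List[int],
--     total_supply: int,
-- ) -> int:
--     """Calculate Nakamoto coefficient (min holders for 51% control).
--
--     Args:
--         balances: List of holder balances (sorted descending)
--         total_supply: Total token supply
--
--     Returns:
--         Minimum number of holders needed to control 51% of supply
--     """
--     if not balances or total_supply == 0:
--         return 0
--
--     target = total_supply * 51 // 100  # 51%
--     cumulative = 0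
--
--     for i, balance in enumerate(balances):
--         cumulative += balance
--         if cumulative >= target:
--             return i + 1
--
--     return len(balances)
-- ===== SOURCE B (Python) =====
-- from bisect import bisect_left
-- from itertools import accumulate
--
--
-- def _calculate_nakamoto(balances, total_supply):
--     """Nakamoto coefficient: smallest number of top holders whose combined
--     balance reaches 51% of the supply.  Balances are non-negative, so the
--     prefix-sum table is non-decreasing and can be binary-searched."""
--     if not balances or total_supply == 0:
--         return 0
--     target = total_supply * 51 // 100
--     acc = list(accumulate(balances))
--     return min(bisect_left(acc, target) + 1, len(balances))
-- ===== Notes on version B (the rewrite author's own statement) =====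
-- stated objective: alternative
-- what changed: Replaces A's early-exit cumulative scan by building the full prefix-sum table with itertools.accumulate and binary-searching it with bisect_left for the 51% target; Pre_ restricts to the natural domain of non-negative holder balances, since B's binary search relies on the prefix sums being non-decreasing.
-- outside the precondition, e.g. on _calculate_nakamoto([10, -20, 10], 10): A returns 1, B returns 3
import Mathlib
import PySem

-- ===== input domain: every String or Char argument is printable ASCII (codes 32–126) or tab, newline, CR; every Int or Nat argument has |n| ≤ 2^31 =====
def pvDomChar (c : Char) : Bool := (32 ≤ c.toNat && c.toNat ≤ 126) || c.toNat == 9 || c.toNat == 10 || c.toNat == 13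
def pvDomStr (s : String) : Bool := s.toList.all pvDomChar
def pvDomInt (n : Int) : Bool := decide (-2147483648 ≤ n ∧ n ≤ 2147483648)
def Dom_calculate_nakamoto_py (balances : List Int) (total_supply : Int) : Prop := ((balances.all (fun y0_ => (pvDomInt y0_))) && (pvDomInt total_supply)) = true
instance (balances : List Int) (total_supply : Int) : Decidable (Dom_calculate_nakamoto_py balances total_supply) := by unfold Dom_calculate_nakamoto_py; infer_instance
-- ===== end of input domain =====

-- B replaces A's early-exit cumulative scan by prefix-sum table + binary search (alternative decomposition, same cost).

-- ===== PORT A =====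
-- A's 'for i, balance in enumerate(balances)' loop with early return, else len(balances)
def nakamotoLoopA (bs : List Int) (target cumulative : Int) (i : Nat) (len : Int) : Int :=
  match bs with
  | [] => len
  | b :: rest =>
      let c := cumulative + b
      if c ≥ target then ((i : Int) + 1) else nakamotoLoopA rest target c (i + 1) len

def calculate_nakamoto_py (balances : List Int) (total_supply : Int) : Int :=
  if balances = [] ∨ total_supply = 0 then 0
  else
    let target := PySem.Int.floordiv (total_supply * 51) 100
    nakamotoLoopA balances target 0 0 (balances.length : Int)

-- ===== PORT B =====
-- Source B's 'list(accumulate(balances))'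
def prefixSums (bs : List Int) (c : Int) : List Int :=
  match bs with
  | [] => []
  | b :: rest => (c + b) :: prefixSums rest (c + b)

-- Source B's 'bisect_left(acc, target)' (CPython's lo/hi halving loop, exact;
-- fuel only bounds the iteration count so the recursion is structural: hi - lo ≤ fuel always holds at the call)
def bisectLeft (l : List Int) (t : Int) (lo hi fuel : Nat) : Nat :=
  match fuel with
  | 0 => lo
  | fuel + 1 =>
    if lo < hi then
      let mid := (lo + hi) / 2
      if l.getD mid 0 < t then bisectLeft l t (mid + 1) hi fuel
      else bisectLeft l t lo mid fuel
    else lo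

def calculate_nakamoto_py_alt (balances : List Int) (total_supply : Int) : Int :=
  if balances = [] ∨ total_supply = 0 then 0
  else
    let target := PySem.Int.floordiv (total_supply * 51) 100
    let acc := prefixSums balances 0
    min ((bisectLeft acc target 0 acc.length acc.length : Int) + 1) (balances.length : Int)

-- ===== PRECONDITION & SPEC =====
-- Pre_ excludes lists containing a negative balance: holder balances are non-negative in this
-- function's natural domain, and B's binary search relies on the non-decreasing prefix sums that
-- non-negativity guarantees.
def Pre_calculate_nakamoto_py (balances : List Int) (total_supply : Int) : Prop :=
  ∀ b ∈ balances, 0 ≤ b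
instance (balances : List Int) (total_supply : Int) : Decidable (Pre_calculate_nakamoto_py balances total_supply) := by unfold Pre_calculate_nakamoto_py; infer_instance

def pvWitness_calculate_nakamoto_py : List Int × Int := ([5, 3, 2], 10)

def Spec_calculate_nakamoto_py (balances : List Int) (total_supply : Int) (out : Int) : Prop := out = calculate_nakamoto_py_alt balances total_supply
instance (balances : List Int) (total_supply : Int) (out : Int) : Decidable (Spec_calculate_nakamoto_py balances total_supply out) := by unfold Spec_calculate_nakamoto_py; infer_instance

-- ===== CLAIM (what is proved, stated in full; the proofs are below) =====
def Claim_equal_calculate_nakamoto_py : Prop := ∀ (balances : List Int) (total_supply : Int), Dom_calculate_nakamoto_py balances total_supply → Pre_calculate_nakamoto_py balances total_supply → Spec_calculate_nakamoto_py balances total_supply (calculate_nakamoto_py balances total_supply)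

-- ===== LEMMAS AND PROOFS =====

theorem prefixSums_length (bs : List Int) (c : Int) : (prefixSums bs c).length = bs.length := by
  induction bs generalizing c with
  | nil => rfl
  | cons b rest ih => simp [prefixSums, ih]

-- A's loop returns i + (length of the <target prefix of the prefix sums) + 1, or len if all stay below
theorem nakamotoLoopA_eq (bs : List Int) (t c : Int) (i : Nat) (len : Int) :
    nakamotoLoopA bs t c i len =
      (if ((prefixSums bs c).takeWhile (fun x => decide (x < t))).length < bs.length
       then ((i : Int) + ((prefixSums bs c).takeWhile (fun x => decide (x < t))).length + 1)
       else len) := by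
  induction bs generalizing c i with
  | nil => simp [nakamotoLoopA, prefixSums]
  | cons b rest ih =>
    simp only [nakamotoLoopA, prefixSums]
    by_cases h : c + b ≥ t
    · have hd : decide (c + b < t) = false := by simp; omega
      rw [if_pos h]
      simp [hd]
    · have hd : decide (c + b < t) = true := by simp; omega
      rw [if_neg h]
      simp only [List.takeWhile_cons, hd, if_true, List.length_cons]
      rw [ih (c + b) (i + 1)]
      by_cases hk : ((prefixSums rest (c + b)).takeWhile (fun x => decide (x < t))).length < rest.length
      · rw [if_pos hk, if_pos (by omega)]
        push_cast; ring
      · rw [if_neg hk, if_neg (by omega)]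

-- under non-negative balances the prefix sums are ≥ the seed and pairwise nondecreasing
theorem prefixSums_ge_and_sorted (bs : List Int) (c : Int) (h : ∀ b ∈ bs, 0 ≤ b) :
    (∀ y ∈ prefixSums bs c, c ≤ y) ∧ (prefixSums bs c).Pairwise (· ≤ ·) := by
  induction bs generalizing c with
  | nil => simp [prefixSums]
  | cons b rest ih =>
    have hb : 0 ≤ b := h b (List.mem_cons_self)
    have hrest : ∀ x ∈ rest, 0 ≤ x := fun x hx => h x (List.mem_cons_of_mem _ hx)
    obtain ⟨h1, h2⟩ := ih (c + b) hrest
    refine ⟨?_, ?_⟩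
    · intro y hy
      simp only [prefixSums, List.mem_cons] at hy
      rcases hy with rfl | hy
      · omega
      · have := h1 y hy; omega
    · simp only [prefixSums, List.pairwise_cons]
      exact ⟨h1, h2⟩

-- in a nondecreasing list, countP (< t) equals the length of the <t prefix
theorem sorted_countP_eq_takeWhile (l : List Int) (t : Int) (hs : l.Pairwise (· ≤ ·)) :
    l.countP (fun x => decide (x < t)) = (l.takeWhile (fun x => decide (x < t))).length := by
  induction l with
  | nil => rfl
  | cons x rest ih =>
    rw [List.pairwise_cons] at hs
    obtain ⟨hx, hrest⟩ := hs
    by_cases hxt : x < t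
    · simp only [List.countP_cons, List.takeWhile_cons, hxt, decide_true, if_true,
        List.length_cons, ih hrest]
    · have hz : rest.countP (fun x => decide (x < t)) = 0 := by
        rw [List.countP_eq_zero]
        intro y hy
        have := hx y hy
        simp; omega
      simp [hxt, hz]

-- in a sorted list, the elements < t are exactly the first countP of them
theorem sorted_lt_iff_countP (l : List Int) (t : Int) (hs : l.Pairwise (· ≤ ·)) :
    ∀ j (h : j < l.length), (l[j] < t ↔ j < l.countP (fun x => decide (x < t))) := by
  induction l with
  | nil => intro j h; simp at h
  | cons x rest ih =>
    intro j h
    rw [List.pairwise_cons] at hs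
    obtain ⟨hx, hrest⟩ := hs
    by_cases hxt : x < t
    · cases j with
      | zero =>
        simp only [List.getElem_cons_zero, List.countP_cons]
        simp [hxt]
      | succ j' =>
        have h' : j' < rest.length := by simpa using h
        simp only [List.getElem_cons_succ, List.countP_cons]
        have := ih hrest j' h'
        simp only [hxt, decide_true, if_true]
        omega
    · have hz : rest.countP (fun x => decide (x < t)) = 0 := by
        rw [List.countP_eq_zero]
        intro y hy
        have := hx y hy
        simp; omega
      cases j with
      | zero =>
        simp only [List.getElem_cons_zero, List.countP_cons]
        simp [hxt, hz]
      | succ j' =>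
        have h' : j' < rest.length := by simpa using h
        simp only [List.getElem_cons_succ, List.countP_cons]
        have hy : ¬ rest[j'] < t := by
          have := hx rest[j'] (List.getElem_mem h')
          omega
        simp [hxt, hz, hy]

-- binary search on a threshold-structured list finds countP (< t), given enough fuel
theorem bisectLeft_eq (l : List Int) (t : Int)
    (hiff : ∀ j (h : j < l.length), (l[j] < t ↔ j < l.countP (fun x => decide (x < t)))) :
    ∀ fuel lo hi, hi - lo ≤ fuel → lo ≤ l.countP (fun x => decide (x < t)) →
      l.countP (fun x => decide (x < t)) ≤ hi → hi ≤ l.length →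
      bisectLeft l t lo hi fuel = l.countP (fun x => decide (x < t)) := by
  intro fuel
  induction fuel with
  | zero => intro lo hi hf h1 h2 h3; simp only [bisectLeft]; omega
  | succ fuel ih =>
    intro lo hi hf h1 h2 h3
    rw [bisectLeft]
    by_cases hlh : lo < hi
    · rw [if_pos hlh]
      have hmid1 : (lo + hi) / 2 < hi := by omega
      have hmlen : (lo + hi) / 2 < l.length := by omega
      have hget : l.getD ((lo + hi) / 2) 0 = l[(lo + hi) / 2] := List.getD_eq_getElem l 0 hmlen
      by_cases hc : l.getD ((lo + hi) / 2) 0 < t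
      · rw [if_pos hc]
        have hmc : (lo + hi) / 2 < l.countP (fun x => decide (x < t)) := by
          rw [← hiff _ hmlen, ← hget]; exact hc
        apply ih ((lo + hi) / 2 + 1) hi <;> omega
      · rw [if_neg hc]
        have hcm : l.countP (fun x => decide (x < t)) ≤ (lo + hi) / 2 := by
          by_contra hlt
          exact hc (by rw [hget]; exact (hiff _ hmlen).mpr (by omega))
        apply ih lo ((lo + hi) / 2) <;> omega
    · rw [if_neg hlh]; omega

-- ===== VERDICT (by name: the statement is the Claim_ definition above) =====
theorem calculate_nakamoto_py_spec : Claim_equal_calculate_nakamoto_py := by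
  intro balances total_supply _ hpre
  unfold Spec_calculate_nakamoto_py calculate_nakamoto_py calculate_nakamoto_py_alt
  by_cases hguard : balances = [] ∨ total_supply = 0
  · simp [hguard]
  · rw [if_neg hguard, if_neg hguard]
    simp only
    set t := PySem.Int.floordiv (total_supply * 51) 100 with ht
    set acc := prefixSums balances 0 with hacc
    have halen : acc.length = balances.length := prefixSums_length _ _
    obtain ⟨-, hsorted⟩ := prefixSums_ge_and_sorted balances 0 hpre
    rw [← hacc] at hsorted
    have hiff := sorted_lt_iff_countP acc t hsorted
    set c := acc.countP (fun x => decide (x < t)) with hc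
    have hcle : c ≤ acc.length := List.countP_le_length
    have hbis := bisectLeft_eq acc t hiff acc.length 0 acc.length (by omega) (by omega) hcle (le_refl _)
    have hcount : c = (acc.takeWhile (fun x => decide (x < t))).length :=
      sorted_countP_eq_takeWhile acc t hsorted
    rw [nakamotoLoopA_eq, ← hacc, ← hcount, hbis, ← hc]
    by_cases hlt : c < balances.length
    · rw [if_pos hlt, min_eq_left (by push_cast; omega)]
      push_cast; ring
    · have hceq : c = balances.length := by omega
      rw [if_neg hlt, min_eq_right (by push_cast; omega)]
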